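-- pv_equiv track=rewrite | github.com/Nurali017/patents_trials | trials_app/management/commands/recalc_application_status.py | resolve_migrated_status
-- ===== SOURCE A (Python) =====
-- ONGOING_STATUSES = {
--     'continue', 'planned', 'trial_created', 'trial_in_progress',
--     'trial_completed', 'decision_pending', 'decision_made',
-- }
--
-- def resolve_migrated_status(oblast_statuses):
--     """Gosreestr-style priority. Withdrawn excluded (as in Gosreestr)."""
--     statuses = {s for s in oblast_statuses if s != 'withdrawn'}
--
--     if not statuses:
--         return None  # all withdrawn or empty → don't change
--
--     # Priority 1: approved wins
--     if 'approved' in statuses: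
--         return 'registered'
--
--     # Priority 2: ongoing (does NOT include trial_plan_created)
--     if statuses & ONGOING_STATUSES:
--         return 'in_progress'
--
--     # trial_plan_created → distributed (separate from ongoing)
--     if 'trial_plan_created' in statuses:
--         return 'distributed'
--
--     # Priority 3: all removed/rejected
--     if statuses <= {'removed', 'rejected'}:
--         return 'rejected'
--
--     return None  # don't change
-- ===== SOURCE B (Python) =====
-- ONGOING_STATUSES = {
--     'continue', 'planned', 'trial_created', 'trial_in_progress',
--     'trial_completed', 'decision_pending', 'decision_made',
-- }
--
-- def resolve_migrated_status(oblast_statuses):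
--     """Single pass over oblast_statuses accumulating flags; no set building."""
--     saw_any = has_approved = has_ongoing = has_trial_plan = False
--     all_rr = True
--     for s in oblast_statuses:
--         if s == 'withdrawn':
--             continue
--         saw_any = True
--         has_approved = has_approved or s == 'approved'
--         has_ongoing = has_ongoing or s in ONGOING_STATUSES
--         has_trial_plan = has_trial_plan or s == 'trial_plan_created'
--         all_rr = all_rr and (s == 'removed' or s == 'rejected')
--     if not saw_any:
--         return None
--     if has_approved:
--         return 'registered'
--     if has_ongoing:
--         return 'in_progress'
--     if has_trial_plan:
--         return 'distributed'
--     if all_rr: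
--         return 'rejected'
--     return None
-- ===== Notes on version B (the rewrite author's own statement) =====
-- stated objective: alternative
-- what changed: Replaces set construction plus four separate set operations (membership, intersection, subset test) with a single loop that accumulates five boolean flags and one if-chain afterwards.
import Mathlib
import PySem

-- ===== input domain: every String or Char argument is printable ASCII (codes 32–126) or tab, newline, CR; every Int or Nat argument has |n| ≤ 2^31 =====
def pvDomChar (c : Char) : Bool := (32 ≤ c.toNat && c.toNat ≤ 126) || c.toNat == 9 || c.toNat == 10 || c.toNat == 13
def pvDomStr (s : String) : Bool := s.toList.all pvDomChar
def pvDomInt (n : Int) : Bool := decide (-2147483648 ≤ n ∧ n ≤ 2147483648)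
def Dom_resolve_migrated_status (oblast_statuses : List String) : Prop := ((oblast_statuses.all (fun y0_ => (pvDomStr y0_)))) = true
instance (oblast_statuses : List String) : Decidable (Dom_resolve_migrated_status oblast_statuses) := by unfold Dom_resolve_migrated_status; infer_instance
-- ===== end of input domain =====

-- B replaces A's set construction and four set operations by one flag-accumulating pass; objective: alternative decomposition (same cost).

-- ===== PORT A =====
def ONGOING_STATUSES : PySem.Set String := PySem.Set.ofList
  ["continue", "planned", "trial_created", "trial_in_progress",
   "trial_completed", "decision_pending", "decision_made"]

-- set comprehension {s for s in oblast_statuses if s != 'withdrawn'};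
-- only membership/intersection/subset of the set are used afterwards, so Set order is irrelevant
def resolve_migrated_status (oblast_statuses : List String) : Option String :=
  let statuses : PySem.Set String :=
    PySem.Set.ofList (oblast_statuses.filter (fun s => s != "withdrawn"))
  if statuses = [] then none
  else if PySem.Set.contains statuses "approved" then some "registered"
  else if PySem.Set.inter statuses ONGOING_STATUSES ≠ [] then some "in_progress"
  else if PySem.Set.contains statuses "trial_plan_created" then some "distributed"
  else if PySem.Set.issubset statuses (PySem.Set.ofList ["removed", "rejected"]) then some "rejected"
  else none

-- ===== PORT B =====
-- loop body of Source B: state = (saw_any, has_approved, has_ongoing, has_trial_plan, all_rr)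
def pvStep (st : Bool × Bool × Bool × Bool × Bool) (s : String) : Bool × Bool × Bool × Bool × Bool :=
  if s == "withdrawn" then st
  else (true,
        st.2.1 || s == "approved",
        st.2.2.1 || PySem.Set.contains ONGOING_STATUSES s,
        st.2.2.2.1 || s == "trial_plan_created",
        st.2.2.2.2 && (s == "removed" || s == "rejected"))

def resolve_migrated_status_alt (oblast_statuses : List String) : Option String :=
  let st := oblast_statuses.foldl pvStep (false, false, false, false, true)
  if !st.1 then none
  else if st.2.1 then some "registered"
  else if st.2.2.1 then some "in_progress"
  else if st.2.2.2.1 then some "distributed"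
  else if st.2.2.2.2 then some "rejected"
  else none

-- ===== PRECONDITION & SPEC =====
def Spec_resolve_migrated_status (oblast_statuses : List String) (out : Option String) : Prop := out = resolve_migrated_status_alt oblast_statuses
instance (oblast_statuses : List String) (out : Option String) : Decidable (Spec_resolve_migrated_status oblast_statuses out) := by unfold Spec_resolve_migrated_status; infer_instance

-- ===== CLAIM (what is proved, stated in full; the proofs are below) =====
def Claim_equal_resolve_migrated_status : Prop := ∀ (oblast_statuses : List String), Dom_resolve_migrated_status oblast_statuses → Spec_resolve_migrated_status oblast_statuses (resolve_migrated_status oblast_statuses)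

-- ===== LEMMAS AND PROOFS =====

-- the fold computes ORs of list-level `any`s and an AND of a list-level `all`
theorem pvFold_char (xs : List String) (st : Bool × Bool × Bool × Bool × Bool) :
    xs.foldl pvStep st =
      (st.1 || xs.any (fun s => s != "withdrawn"),
       st.2.1 || xs.any (fun s => s != "withdrawn" && s == "approved"),
       st.2.2.1 || xs.any (fun s => s != "withdrawn" && PySem.Set.contains ONGOING_STATUSES s),
       st.2.2.2.1 || xs.any (fun s => s != "withdrawn" && s == "trial_plan_created"),
       st.2.2.2.2 && xs.all (fun s => s == "withdrawn" || (s == "removed" || s == "rejected"))) := by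
  induction xs generalizing st with
  | nil => simp
  | cons x xs ih =>
    simp only [List.foldl_cons, List.any_cons, List.all_cons, ih]
    by_cases h : x = "withdrawn"
    · simp [pvStep, h]
    · have h' : (x != "withdrawn") = true := by simp [h]
      have h'' : (x == "withdrawn") = false := by simp [h]
      simp [pvStep, h', h'', Bool.or_assoc, Bool.and_assoc]

theorem pvE0 (xs : List String) :
    (PySem.Set.ofList (xs.filter (fun s => s != "withdrawn")) = []) ↔
      (xs.any (fun s => s != "withdrawn") = false) := by
  rw [List.eq_nil_iff_forall_not_mem, List.any_eq_false]
  simp [PySem.Set.mem_ofList, List.mem_filter]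

theorem pvE1 (xs : List String) (t : String) :
    (PySem.Set.contains (PySem.Set.ofList (xs.filter (fun s => s != "withdrawn"))) t = true) ↔
      (xs.any (fun s => s != "withdrawn" && s == t) = true) := by
  rw [PySem.Set.contains_iff, List.any_eq_true]
  simp only [PySem.Set.mem_ofList, List.mem_filter, Bool.and_eq_true, beq_iff_eq, bne_iff_ne, ne_eq]
  constructor
  · rintro ⟨ha, hw⟩; exact ⟨t, ha, hw, rfl⟩
  · rintro ⟨a, ha, hw, rfl⟩; exact ⟨ha, hw⟩

theorem pvE2 (xs : List String) :
    (PySem.Set.inter (PySem.Set.ofList (xs.filter (fun s => s != "withdrawn"))) ONGOING_STATUSES ≠ []) ↔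
      (xs.any (fun s => s != "withdrawn" && PySem.Set.contains ONGOING_STATUSES s) = true) := by
  rw [Ne, List.eq_nil_iff_forall_not_mem, List.any_eq_true]
  simp only [not_forall, not_not, PySem.Set.mem_inter, PySem.Set.mem_ofList, List.mem_filter,
    Bool.and_eq_true, PySem.Set.contains_iff]
  constructor
  · rintro ⟨a, ⟨⟨ha, hw⟩, ho⟩⟩; exact ⟨a, ha, hw, ho⟩
  · rintro ⟨a, ha, hw, ho⟩; exact ⟨a, ⟨ha, hw⟩, ho⟩

theorem pvE4 (xs : List String) :
    (PySem.Set.issubset (PySem.Set.ofList (xs.filter (fun s => s != "withdrawn")))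
        (PySem.Set.ofList ["removed", "rejected"]) = true) ↔
      (xs.all (fun s => s == "withdrawn" || (s == "removed" || s == "rejected")) = true) := by
  rw [PySem.Set.issubset_iff, List.all_eq_true]
  simp only [PySem.Set.mem_ofList, List.mem_filter, and_imp, List.mem_cons,
    List.not_mem_nil, or_false, Bool.or_eq_true, beq_iff_eq, bne_iff_ne, ne_eq]
  constructor
  · intro h s hs
    by_cases hw : s = "withdrawn"
    · exact Or.inl hw
    · exact Or.inr (h s hs hw)
  · intro h s hs hw
    rcases h s hs with h' | h'
    · exact absurd h' hw
    · exact h'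

theorem resolve_migrated_status_spec : Claim_equal_resolve_migrated_status := by
  intro xs _
  show resolve_migrated_status xs = resolve_migrated_status_alt xs
  unfold resolve_migrated_status resolve_migrated_status_alt
  simp only [pvFold_char, Bool.false_or, Bool.true_and, Bool.not_eq_eq_eq_not, Bool.not_true,
    pvE0, pvE1, pvE2, pvE4]
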